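-- pv_equiv track=rewrite | github.com/heei3k/heei3k4g | test/string2byte.py | words_to_bytes
-- ===== SOURCE A (Python) =====
-- def words_to_bytes(t):
--     n = []
--     r = 0
--     while r < 32 * len(t):
--         # 获取当前字节在“词”数组中的索引
--         word_index = r >> 5
--         # 计算当前字节在“词”中的偏移量
--         bit_offset = 24 - (r % 32)
--         # 从“词”中提取出当前字节
--         byte_value = (t[word_index] >> bit_offset) & 0xFF
--         # 将提取出的字节添加到结果列表中
--         n.append(byte_value)
--         # 移动到下一个字节
--         r += 8
--     return n
-- ===== SOURCE B (Python) =====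
-- def words_to_bytes(t):
--     # Stage 1: pack all words (masked to 32 bits) into one big integer.
--     big = 0
--     for w in t:
--         big = (big << 32) | (w & 0xFFFFFFFF)
--     # Stage 2: peel bytes off the big integer least-significant first,
--     # then reverse to get big-endian order.
--     out = []
--     for _ in range(4 * len(t)):
--         big, b = divmod(big, 256)
--         out.append(b)
--     out.reverse()
--     return out
-- ===== Notes on version B (the rewrite author's own statement) =====
-- stated objective: alternative
-- what changed: Instead of indexing words and shifting out one byte per loop step, B first packs all masked 32-bit words into a single big integer and then peels bytes off it with divmod in a second pass, building the list back-to-front and reversing.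
import Mathlib
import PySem

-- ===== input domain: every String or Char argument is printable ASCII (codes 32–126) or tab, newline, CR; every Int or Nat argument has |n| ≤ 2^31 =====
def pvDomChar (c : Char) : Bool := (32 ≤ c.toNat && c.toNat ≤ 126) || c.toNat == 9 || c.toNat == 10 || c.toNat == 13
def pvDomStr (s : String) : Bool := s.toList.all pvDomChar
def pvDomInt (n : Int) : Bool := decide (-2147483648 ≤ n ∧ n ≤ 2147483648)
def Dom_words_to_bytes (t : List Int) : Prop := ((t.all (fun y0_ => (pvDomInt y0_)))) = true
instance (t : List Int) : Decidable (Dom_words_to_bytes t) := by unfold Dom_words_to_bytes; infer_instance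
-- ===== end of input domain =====

-- B packs all masked 32-bit words into one big integer and then peels bytes off it with
-- divmod in a second pass, building the list back-to-front and reversing, instead of A's
-- single flat byte-counter loop with index arithmetic; proved to return the same list.

-- ===== PORT A =====
-- while r < 32*len(t): ... r += 8   — ported as fuel recursion; fuel 4*len(t)+1 covers
-- every iteration plus the final failing test. bit_offset = 24 - r%32 is provably
-- nonnegative when used, so `.toNat` on the shift amount is exact.
def wtbLoopA (t : List Int) : Nat → Int → List Int → List Int
  | 0, _, n => n
  | fuel+1, r, n =>
    if r < 32 * (t.length : Int) then
      let word_index : Int := r >>> (5 : Nat)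
      let bit_offset : Int := 24 - (PySem.Int.mod r 32)
      -- t[word_index]: word_index is always in range while the guard holds (r ≥ 0),
      -- so pyGet? is some; the default 0 is never used.
      let byte_value : Int := PySem.Int.band (((PySem.List.pyGet? t word_index).getD 0) >>> bit_offset.toNat) 0xFF
      wtbLoopA t fuel (r + 8) (n ++ [byte_value])
    else n

def words_to_bytes (t : List Int) : List Int := wtbLoopA t (4 * t.length + 1) 0 []

-- ===== PORT B =====
-- stage 1: big = (big << 32) | (w & 0xFFFFFFFF) over the words
def wtbPack : List Int → Int → Int
  | [], big => big
  | w :: ws, big => wtbPack ws (PySem.Int.bor (big <<< (32 : Nat)) (PySem.Int.band w 0xFFFFFFFF))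

-- stage 2: for _ in range(4*len(t)): big, b = divmod(big, 256); out.append(b)
def wtbUnpack : Nat → Int → List Int → List Int
  | 0, _, out => out
  | k+1, big, out => wtbUnpack k (PySem.Int.floordiv big 256) (out ++ [PySem.Int.mod big 256])

def words_to_bytes_alt (t : List Int) : List Int :=
  (wtbUnpack (4 * t.length) (wtbPack t 0) []).reverse

-- ===== PRECONDITION & SPEC =====
def Spec_words_to_bytes (t : List Int) (out : List Int) : Prop := out = words_to_bytes_alt t
instance (t : List Int) (out : List Int) : Decidable (Spec_words_to_bytes t out) := by unfold Spec_words_to_bytes; infer_instance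

-- ===== CLAIM (what is proved, stated in full; the proofs are below) =====
def Claim_equal_words_to_bytes : Prop := ∀ (t : List Int), Dom_words_to_bytes t → Spec_words_to_bytes t (words_to_bytes t)

-- ===== LEMMAS AND PROOFS =====

-- the big-endian shift bytes of one word: the common specification both sides meet
def wtbBE (w : Int) : List Int := ([24, 16, 8, 0] : List Nat).map (fun s => PySem.Int.band (w >>> s) 0xFF)

-- ---- A's loop produces the flat list of shift bytes ----

theorem wtbLoopA_step (t : List Int) (fuel : Nat) (r : Int) (n : List Int)
    (h : r < 32 * (t.length : Int)) :
    wtbLoopA t (fuel + 1) r n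
      = wtbLoopA t fuel (r + 8)
          (n ++ [PySem.Int.band (((PySem.List.pyGet? t (r >>> (5 : Nat))).getD 0) >>> (24 - PySem.Int.mod r 32).toNat) 0xFF]) := by
  simp [wtbLoopA, h]

-- At r = 32*k + c (c ∈ {0,8,16,24}, k = |pre|) A's byte expression is the (24-c)-shift byte of w.
theorem wtbByte_at (pre ws : List Int) (w : Int) (c : Nat) (hc : c ≤ 24) :
    PySem.Int.band
        (((PySem.List.pyGet? (pre ++ w :: ws) ((32 * (pre.length : Int) + (c : Int)) >>> (5 : Nat))).getD 0)
          >>> (24 - PySem.Int.mod (32 * (pre.length : Int) + (c : Int)) 32).toNat) 0xFF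
      = PySem.Int.band (w >>> (24 - (c : Int))) 0xFF := by
  have h1 : (32 * (pre.length : Int) + (c : Int)) = ((32 * pre.length + c : Nat) : Int) := by
    push_cast; ring
  have h2 : (32 * (pre.length : Int) + (c : Int)) >>> (5 : Nat) = (pre.length : Int) := by
    rw [h1, ← Int.natCast_shiftRight]
    have h : (32 * pre.length + c) >>> 5 = pre.length := by
      simp [Nat.shiftRight_eq_div_pow]
      omega
    rw [h]
  have h3 : PySem.Int.mod (32 * (pre.length : Int) + (c : Int)) 32 = (c : Int) := by
    rw [h1]
    rw [show (32 : Int) = ((32 : Nat) : Int) from rfl, PySem.Int.mod_natCast]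
    norm_cast
    omega
  rw [h2, h3]
  have h4 : PySem.List.pyGet? (pre ++ w :: ws) (pre.length : Int) = some w := by
    rw [PySem.List.pyGet?_natCast]
    simp
  rw [h4]
  have h6 : w >>> ((24 - (c : Int)).toNat) = w >>> (24 - (c : Int)) := by
    rw [← Int.shiftRight_natCast_right]
    congr 1
    omega
  simp only [Option.getD_some]
  rw [h6]

-- A's loop, started at r = 32*k with k = |pre| words already consumed, flattens the rest's bytes.
theorem wtbLoopA_eq (rest : List Int) : ∀ (pre n : List Int),
    wtbLoopA (pre ++ rest) (4 * rest.length + 1) (32 * (pre.length : Int)) n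
      = n ++ rest.flatMap wtbBE := by
  induction rest with
  | nil =>
    intro pre n
    simp [wtbLoopA]
  | cons w ws ih =>
    intro pre n
    have hfuel : 4 * (w :: ws).length + 1 = (((4 * ws.length + 1) + 1) + 1) + 1 + 1 := by
      simp [List.length_cons]; omega
    have hlen : ∀ j : Nat, j < 32 →
        32 * (pre.length : Int) + (j : Int) < 32 * ((pre ++ w :: ws).length : Int) := by
      intro j hj
      simp [List.length_append, List.length_cons]
      omega
    rw [hfuel]
    rw [wtbLoopA_step _ _ _ _ (by
      have h := hlen 0 (by omega); push_cast at h ⊢; linarith)]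
    rw [wtbLoopA_step _ _ _ _ (by
      have h := hlen 8 (by omega); push_cast at h ⊢; linarith)]
    rw [wtbLoopA_step _ _ _ _ (by
      have h := hlen 16 (by omega); push_cast at h ⊢; linarith)]
    rw [wtbLoopA_step _ _ _ _ (by
      have h := hlen 24 (by omega); push_cast at h ⊢; linarith)]
    rw [show (32 * (pre.length : Int) + 8 + 8 + 8 + 8) = 32 * (((pre ++ [w]).length : Int)) by
      simp [List.length_append]; ring]
    conv_lhs =>
      rw [show (32 * (pre.length : Int)) = 32 * (pre.length : Int) + ((0:Nat) : Int) by push_cast; ring]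
      rw [show (32 * (pre.length : Int) + ((0:Nat) : Int) + 8) = 32 * (pre.length : Int) + ((8:Nat) : Int) by push_cast; ring]
      rw [show (32 * (pre.length : Int) + ((8:Nat) : Int) + 8) = 32 * (pre.length : Int) + ((16:Nat) : Int) by push_cast; ring]
      rw [show (32 * (pre.length : Int) + ((16:Nat) : Int) + 8) = 32 * (pre.length : Int) + ((24:Nat) : Int) by push_cast; ring]
      rw [wtbByte_at pre ws w 0 (by omega), wtbByte_at pre ws w 8 (by omega),
          wtbByte_at pre ws w 16 (by omega), wtbByte_at pre ws w 24 (by omega)]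
    rw [show pre ++ w :: ws = (pre ++ [w]) ++ ws by simp]
    rw [show n ++ (w :: ws).flatMap wtbBE = (n ++ wtbBE w) ++ ws.flatMap wtbBE by simp]
    refine Eq.trans ?_ (ih (pre ++ [w]) (n ++ wtbBE w))
    congr 1
    simp [wtbBE]

-- ---- bit-level bridges ----

-- x & (2^k - 1) is x mod 2^k, also on negative x (Python's infinite two's complement)
theorem wtb_band_mask (x : Int) (k : Nat) :
    PySem.Int.band x (((2 ^ k - 1 : Nat) : Int)) = x % (((2 ^ k : Nat) : Int)) := by
  have hP : 1 ≤ 2 ^ k := Nat.one_le_two_pow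
  have hb : (0:Int) ≤ ((2 ^ k - 1 : Nat) : Int) := by positivity
  unfold PySem.Int.band
  by_cases hx : (0:Int) ≤ x
  · simp only [hx, hb, if_true]
    rw [Int.toNat_natCast, Nat.and_two_pow_sub_one_eq_mod]
    push_cast
    rw [Int.toNat_of_nonneg hx]
  · simp only [hx, hb, if_true, if_false]
    rw [Int.toNat_natCast, Nat.and_comm, Nat.and_two_pow_sub_one_eq_mod]
    set n : Nat := (-x - 1).toNat with hn
    have hxn : x = -((n : Int) + 1) := by omega
    have hdm : ((2 ^ k : Nat) : Int) * ((n / 2 ^ k : Nat) : Int) + ((n % 2 ^ k : Nat) : Int) = (n : Int) := by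
      exact_mod_cast Nat.div_add_mod n (2 ^ k)
    have hrlt : ((n % 2 ^ k : Nat) : Int) < ((2 ^ k : Nat) : Int) := by
      exact_mod_cast Nat.mod_lt n (show 0 < 2 ^ k by omega)
    have hr0 : (0:Int) ≤ ((n % 2 ^ k : Nat) : Int) := by positivity
    have hPz : (1:Int) ≤ ((2 ^ k : Nat) : Int) := by exact_mod_cast hP
    have hsplit : -((n : Int) + 1)
        = (((2 ^ k : Nat) : Int) - 1 - ((n % 2 ^ k : Nat) : Int))
          + (-(((n / 2 ^ k : Nat) : Int)) - 1) * ((2 ^ k : Nat) : Int) := by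
      linear_combination hdm
    rw [hxn, hsplit, Int.add_mul_emod_self_right, Int.emod_eq_of_lt (by linarith) (by linarith)]
    have e1 : ((2 ^ k - 1 - n % 2 ^ k : Nat) : Int)
        = ((2 ^ k - 1 : Nat) : Int) - ((n % 2 ^ k : Nat) : Int) := by
      rw [Nat.cast_sub (by omega : n % 2 ^ k ≤ 2 ^ k - 1)]
    have e2 : ((2 ^ k - 1 : Nat) : Int) = ((2 ^ k : Nat) : Int) - 1 := by
      rw [Nat.cast_sub hP]
      simp
    rw [e1, e2]

theorem wtb_band_255 (x : Int) : PySem.Int.band x 255 = x % 256 := by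
  have h := wtb_band_mask x 8
  norm_num at h
  exact h

theorem wtb_band_mask32 (x : Int) : PySem.Int.band x 4294967295 = x % 4294967296 := by
  have h := wtb_band_mask x 32
  norm_num at h
  exact h

-- (big << 32) | q  =  big * 2^32 + q  when 0 ≤ big and 0 ≤ q < 2^32
theorem wtb_pack_step (big q : Int) (hb : 0 ≤ big) (h0 : 0 ≤ q) (h1 : q < 4294967296) :
    PySem.Int.bor (big <<< (32 : Nat)) q = big * 4294967296 + q := by
  have hs : big <<< (32 : Nat) = big * 4294967296 := by
    simp [Int.shiftLeft_eq]
  rw [hs, PySem.Int.bor_of_nonneg (by positivity) h0]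
  have ht : (big * 4294967296).toNat = 2 ^ 32 * big.toNat := by omega
  have hq : q.toNat < 2 ^ 32 := by omega
  rw [ht, ← Nat.two_pow_add_eq_or_of_lt hq]
  push_cast
  omega

-- ---- the value packed by stage 1 ----

-- the words' masked values as one number (the proof-level meaning of `big`)
def wtbM : List Int → Int
  | [] => 0
  | w :: ws => PySem.Int.mod w 4294967296 * 256 ^ (4 * ws.length) + wtbM ws

theorem wtbM_bounds : ∀ ws : List Int, 0 ≤ wtbM ws ∧ wtbM ws < 256 ^ (4 * ws.length) := by
  intro ws
  induction ws with
  | nil => simp [wtbM]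
  | cons w ws ih =>
    have hq0 : 0 ≤ PySem.Int.mod w 4294967296 := PySem.Int.mod_nonneg w (by norm_num)
    have hq1 : PySem.Int.mod w 4294967296 < 4294967296 := PySem.Int.mod_lt w (by norm_num)
    have hP : (0:Int) < 256 ^ (4 * ws.length) := by positivity
    constructor
    · simp only [wtbM]
      nlinarith [ih.1]
    · simp only [wtbM, List.length_cons]
      have hpow : (256:Int) ^ (4 * (ws.length + 1)) = 4294967296 * 256 ^ (4 * ws.length) := by
        rw [show 4 * (ws.length + 1) = 4 + 4 * ws.length by ring, pow_add]
        norm_num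
      rw [hpow]
      nlinarith [ih.2]

theorem wtbPack_eq : ∀ (ws : List Int) (big : Int), 0 ≤ big →
    wtbPack ws big = big * 256 ^ (4 * ws.length) + wtbM ws := by
  intro ws
  induction ws with
  | nil => intro big _; simp [wtbPack, wtbM]
  | cons w ws ih =>
    intro big hb
    have hq0 : 0 ≤ PySem.Int.mod w 4294967296 := PySem.Int.mod_nonneg w (by norm_num)
    have hq1 : PySem.Int.mod w 4294967296 < 4294967296 := PySem.Int.mod_lt w (by norm_num)
    simp only [wtbPack, wtbM, List.length_cons]
    rw [wtb_band_mask32]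
    rw [show (w % 4294967296) = PySem.Int.mod w 4294967296 from
      (PySem.Int.mod_eq_emod_of_pos (show (0:Int) < 4294967296 by norm_num)).symm]
    rw [wtb_pack_step big _ hb hq0 hq1]
    rw [ih _ (by nlinarith)]
    have hpow : (256:Int) ^ (4 * (ws.length + 1)) = 4294967296 * 256 ^ (4 * ws.length) := by
      rw [show 4 * (ws.length + 1) = 4 + 4 * ws.length by ring, pow_add]
      norm_num
    rw [hpow]
    ring

-- ---- stage 2 ----

-- the value of `big` after a divmod steps
def wtbDivPow : Nat → Int → Int
  | 0, big => big
  | a+1, big => wtbDivPow a (PySem.Int.floordiv big 256)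

theorem wtbUnpack_add : ∀ (a : Nat) (b : Nat) (big : Int) (out : List Int),
    wtbUnpack (a + b) big out = wtbUnpack b (wtbDivPow a big) (wtbUnpack a big out) := by
  intro a
  induction a with
  | zero => intro b big out; simp [wtbDivPow, wtbUnpack]
  | succ a ih =>
    intro b big out
    rw [Nat.succ_add]
    simp only [wtbUnpack, wtbDivPow]
    exact ih b _ _

theorem wtbDivPow_eq : ∀ (a : Nat) (hi lo : Int), 0 ≤ hi → 0 ≤ lo → lo < 256 ^ a →
    wtbDivPow a (hi * 256 ^ a + lo) = hi := by
  intro a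
  induction a with
  | zero => intro hi lo _ h0 h1; simp [wtbDivPow] at h1 ⊢; omega
  | succ a ih =>
    intro hi lo hhi h0 h1
    simp only [wtbDivPow]
    rw [PySem.Int.floordiv_eq_ediv_of_pos (show (0:Int) < 256 by norm_num)]
    have hsplit : hi * 256 ^ (a + 1) + lo = lo + (hi * 256 ^ a) * 256 := by ring
    rw [hsplit, Int.add_mul_ediv_right _ _ (by norm_num : (256:Int) ≠ 0)]
    have hlo' : lo / 256 < 256 ^ a := by
      rw [Int.ediv_lt_iff_lt_mul (by norm_num)]
      calc lo < 256 ^ (a + 1) := h1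
        _ = 256 ^ a * 256 := by ring
    have := ih hi (lo / 256) hhi (Int.ediv_nonneg h0 (by norm_num)) hlo'
    rw [show lo / 256 + hi * 256 ^ a = hi * 256 ^ a + lo / 256 by ring]
    exact this

-- the four bytes of one word, least significant first, as stage 2 emits them
def wtbLE4 (w : Int) : List Int :=
  [w % 4294967296 % 256, w % 4294967296 / 256 % 256,
   w % 4294967296 / 65536 % 256, w % 4294967296 / 16777216 % 256]

-- all bytes, least significant first
def wtbLE : List Int → List Int
  | [] => []
  | w :: ws => wtbLE ws ++ wtbLE4 w

-- four divmod steps on big = b*2^32 + (w mod 2^32) emit w's low-endian bytes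
theorem wtbPeel4 (b w : Int) (_hb : 0 ≤ b) (out : List Int) :
    wtbUnpack 4 (b * 4294967296 + PySem.Int.mod w 4294967296) out = out ++ wtbLE4 w := by
  have hq0 : 0 ≤ PySem.Int.mod w 4294967296 := PySem.Int.mod_nonneg w (by norm_num)
  have hq1 : PySem.Int.mod w 4294967296 < 4294967296 := PySem.Int.mod_lt w (by norm_num)
  have hqe : PySem.Int.mod w 4294967296 = w % 4294967296 :=
    PySem.Int.mod_eq_emod_of_pos (show (0:Int) < 4294967296 by norm_num)
  rw [hqe] at hq0 hq1 ⊢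
  set q : Int := w % 4294967296 with hq
  simp only [wtbUnpack, wtbLE4,
    PySem.Int.floordiv_eq_ediv_of_pos (show (0:Int) < 256 by norm_num),
    PySem.Int.mod_eq_emod_of_pos (show (0:Int) < 256 by norm_num),
    List.append_assoc, List.cons_append, List.nil_append]
  have e1 : (b * 4294967296 + q) % 256 = q % 256 := by omega
  have e2 : (b * 4294967296 + q) / 256 % 256 = q / 256 % 256 := by omega
  have e3 : (b * 4294967296 + q) / 256 / 256 % 256 = q / 65536 % 256 := by omega
  have e4 : (b * 4294967296 + q) / 256 / 256 / 256 % 256 = q / 16777216 % 256 := by omega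
  rw [e1, e2, e3, e4]

-- stage 2 on big*2^(32n) + (packed words) emits all low-endian bytes of the words
theorem wtbMain : ∀ (ws : List Int) (big : Int) (out : List Int), 0 ≤ big →
    wtbUnpack (4 * ws.length) (big * 256 ^ (4 * ws.length) + wtbM ws) out = out ++ wtbLE ws := by
  intro ws
  induction ws with
  | nil => intro big out _; simp [wtbUnpack, wtbLE, wtbM]
  | cons w ws ih =>
    intro big out hb
    have hq0 : 0 ≤ PySem.Int.mod w 4294967296 := PySem.Int.mod_nonneg w (by norm_num)
    have hq1 : PySem.Int.mod w 4294967296 < 4294967296 := PySem.Int.mod_lt w (by norm_num)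
    have hM := wtbM_bounds ws
    have hpow : (256:Int) ^ (4 * (ws.length + 1)) = 4294967296 * 256 ^ (4 * ws.length) := by
      rw [show 4 * (ws.length + 1) = 4 + 4 * ws.length by ring, pow_add]
      norm_num
    have hT : big * 256 ^ (4 * (w :: ws).length) + wtbM (w :: ws)
        = (big * 4294967296 + PySem.Int.mod w 4294967296) * 256 ^ (4 * ws.length) + wtbM ws := by
      simp only [wtbM, List.length_cons]
      rw [hpow]
      ring
    have hlen : 4 * (w :: ws).length = 4 * ws.length + 4 := by
      simp [List.length_cons]
      ring
    rw [hT, hlen, wtbUnpack_add (4 * ws.length) 4]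
    have hhi : 0 ≤ big * 4294967296 + PySem.Int.mod w 4294967296 := by nlinarith
    rw [wtbDivPow_eq (4 * ws.length) _ (wtbM ws) hhi hM.1 hM.2]
    rw [ih _ out hhi]
    rw [wtbPeel4 big w hb]
    simp [wtbLE]

-- low-endian bytes reversed are the big-endian shift bytes
theorem wtbLE4_reverse (w : Int) : (wtbLE4 w).reverse = wtbBE w := by
  have s24 : w >>> (24 : Int) = w / 16777216 := by
    rw [show (24 : Int) = ((24 : Nat) : Int) by norm_num, Int.shiftRight_natCast_right,
      Int.shiftRight_eq_div_pow]
    norm_num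
  have s16 : w >>> (16 : Int) = w / 65536 := by
    rw [show (16 : Int) = ((16 : Nat) : Int) by norm_num, Int.shiftRight_natCast_right,
      Int.shiftRight_eq_div_pow]
    norm_num
  have s8 : w >>> (8 : Int) = w / 256 := by
    rw [show (8 : Int) = ((8 : Nat) : Int) by norm_num, Int.shiftRight_natCast_right,
      Int.shiftRight_eq_div_pow]
    norm_num
  have s0 : w >>> (0 : Int) = w := by
    rw [show (0 : Int) = ((0 : Nat) : Int) by norm_num, Int.shiftRight_natCast_right,
      Int.shiftRight_eq_div_pow]
    norm_num
  have hBE : wtbBE w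
      = [PySem.Int.band (w >>> (24 : Int)) 255, PySem.Int.band (w >>> (16 : Int)) 255,
         PySem.Int.band (w >>> (8 : Int)) 255, PySem.Int.band (w >>> (0 : Int)) 255] := by
    simp [wtbBE]
  have hL : (wtbLE4 w).reverse
      = [w % 4294967296 / 16777216 % 256, w % 4294967296 / 65536 % 256,
         w % 4294967296 / 256 % 256, w % 4294967296 % 256] := rfl
  rw [hL, hBE, wtb_band_255, wtb_band_255, wtb_band_255, wtb_band_255, s24, s16, s8, s0]
  simp only [List.cons.injEq, and_true]
  refine ⟨by omega, by omega, by omega, by omega⟩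

theorem wtbLE_reverse : ∀ ws : List Int, (wtbLE ws).reverse = ws.flatMap wtbBE := by
  intro ws
  induction ws with
  | nil => simp [wtbLE]
  | cons w ws ih =>
    simp only [wtbLE, List.reverse_append, List.flatMap_cons, ih, wtbLE4_reverse]

-- ===== VERDICT (by name: the statement is the Claim_ definition above) =====
theorem words_to_bytes_spec : Claim_equal_words_to_bytes := by
  intro t _
  unfold Spec_words_to_bytes words_to_bytes words_to_bytes_alt
  have hA : wtbLoopA t (4 * t.length + 1) 0 [] = t.flatMap wtbBE := by
    simpa using wtbLoopA_eq t [] []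
  have hpack : wtbPack t 0 = wtbM t := by
    have := wtbPack_eq t 0 le_rfl
    simpa using this
  have hB : wtbUnpack (4 * t.length) (wtbPack t 0) [] = wtbLE t := by
    rw [hpack]
    have := wtbMain t 0 [] le_rfl
    simpa using this
  rw [hA, hB, wtbLE_reverse]
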